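-- pv_equiv track=rewrite | github.com/pypi-data/pypi-mirror-319 | packages/snakespawn/snakespawn-1.1.10.tar.gz/snakespawn-1.1.10/snakespawn/main.py | snake_caseify
-- ===== SOURCE A (Python) =====
-- def snake_caseify(name:str) -> str:
--     ret = ""
--     name = name[0].lower() + name[1::]
--     prev_char = ""
--     for c in name:
--         if c in " \n\t":
--             prev_char = ' '
--             continue
--         new_c = c
--         if c.isupper():
--             if prev_char == " ":
--                 new_c = f"_{new_c.lower()}"
--             else:
--                 new_c = new_c.lower()
--         ret += new_c
--         prev_char = c
--
--     return ret
-- ===== SOURCE B (Python) =====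
-- def snake_caseify(name: str) -> str:
--     name = name[0].lower() + name[1:]
--     normalized = ''.join(' ' if c in '\n\t' else c for c in name)
--     words = normalized.split(' ')
--     parts = []
--     for i, w in enumerate(words):
--         if i > 0 and w and w[0].isupper():
--             parts.append('_')
--         parts.append(w.lower())
--     return ''.join(parts)
-- ===== Notes on version B (the rewrite author's own statement) =====
-- stated objective: simpler
-- what changed: Replaced A's char-by-char state machine (pending-whitespace flag, per-char uppercase handling) by a three-stage pipeline: normalize tabs/newlines to spaces, split into words on spaces, then map each word to ('_' if it follows whitespace and starts uppercase) + word.lower() and join.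
import Mathlib
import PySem

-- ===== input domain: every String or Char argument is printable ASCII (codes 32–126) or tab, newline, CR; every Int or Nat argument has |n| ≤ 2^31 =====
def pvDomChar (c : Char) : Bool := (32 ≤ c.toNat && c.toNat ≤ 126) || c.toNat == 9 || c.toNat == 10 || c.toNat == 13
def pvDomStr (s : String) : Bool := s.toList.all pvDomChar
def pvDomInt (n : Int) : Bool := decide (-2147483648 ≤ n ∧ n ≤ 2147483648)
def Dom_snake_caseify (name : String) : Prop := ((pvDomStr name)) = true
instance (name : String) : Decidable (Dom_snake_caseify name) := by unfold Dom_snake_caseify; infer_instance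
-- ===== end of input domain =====

-- B replaces A's char-by-char pending-whitespace state machine by normalize / split-into-words / map-over-words; objective: simpler, same O(n) cost.

-- ===== PORT A =====
-- state: (ret so far, prev_char as Option Char: none = "", some ' ' = whitespace seen, some c = last emitted source char)
def snakeStepA (st : List Char × Option Char) (c : Char) : List Char × Option Char :=
  if c = ' ' ∨ c = '\n' ∨ c = '\t' then (st.1, some ' ')
  else
    let new_c : List Char :=
      if PySem.Chars.isupper c then
        (if st.2 = some ' ' then ['_', PySem.Chars.lowerChar c] else [PySem.Chars.lowerChar c])
      else [c]
    (st.1 ++ new_c, some c)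

def snake_caseify (name : String) : String :=
  match name.toList with
  | [] => ""   -- Python raises IndexError here; excluded by Pre_snake_caseify
  | h :: t =>
    let cs := PySem.Chars.lowerChar h :: t
    String.ofList (cs.foldl snakeStepA ([], none)).1

-- ===== PORT B =====
def snakeCondB (w : List Char) : Bool :=
  match w with
  | [] => false
  | c :: _ => PySem.Chars.isupper c

def snakeStepB (acc : List (List Char)) (iw : Int × List Char) : List (List Char) :=
  (acc ++ (if iw.1 > 0 ∧ snakeCondB iw.2 then [['_']] else [])) ++ [PySem.Chars.lower iw.2]

def snake_caseify_alt (name : String) : String :=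
  match name.toList with
  | [] => ""   -- Python raises IndexError here; excluded by Pre_snake_caseify
  | h :: t =>
    let cs := PySem.Chars.lowerChar h :: t
    let normalized := cs.map (fun c => if c = '\n' ∨ c = '\t' then ' ' else c)
    let words := PySem.Chars.splitOn normalized [' ']
    let parts := (PySem.List.enumerate words 0).foldl snakeStepB []
    String.ofList (PySem.Chars.join [] parts)

-- ===== PRECONDITION & SPEC =====
-- Pre_ excludes only the empty string, on which Python A (and B) raise IndexError at name[0].
def Pre_snake_caseify (name : String) : Prop := name ≠ ""
instance (name : String) : Decidable (Pre_snake_caseify name) := by unfold Pre_snake_caseify; infer_instance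
def pvWitness_snake_caseify : String := "Hello World"

def Spec_snake_caseify (name : String) (out : String) : Prop := out = snake_caseify_alt name
instance (name : String) (out : String) : Decidable (Spec_snake_caseify name out) := by unfold Spec_snake_caseify; infer_instance

-- ===== CLAIM (what is proved, stated in full; the proofs are below) =====
def Claim_equal_snake_caseify : Prop := ∀ (name : String), Dom_snake_caseify name → Pre_snake_caseify name → Spec_snake_caseify name (snake_caseify name)

-- ===== LEMMAS AND PROOFS =====

-- reference recursion: A's loop body, with the pending-whitespace flag made explicit
def snakeRun (b : Bool) : List Char → List Char
  | [] => []
  | c :: cs =>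
    if c = ' ' ∨ c = '\n' ∨ c = '\t' then snakeRun true cs
    else (if PySem.Chars.isupper c then
            (if b then ['_', PySem.Chars.lowerChar c] else [PySem.Chars.lowerChar c])
          else [c]) ++ snakeRun false cs

-- simple structural form of splitting on a single space
def snakeSp : List Char → List (List Char)
  | [] => [[]]
  | c :: cs => if c = ' ' then [] :: snakeSp cs else (c :: (snakeSp cs).headI) :: (snakeSp cs).tail

theorem snakeSp_ne_nil (cs : List Char) : snakeSp cs ≠ [] := by
  cases cs with
  | nil => simp [snakeSp]
  | cons c cs => unfold snakeSp; split <;> simp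

-- A-side: the foldl over snakeStepA computes snakeRun
theorem foldl_snakeStepA (cs : List Char) (acc : List Char) (p : Option Char) :
    (cs.foldl snakeStepA (acc, p)).1 = acc ++ snakeRun (decide (p = some ' ')) cs := by
  induction cs generalizing acc p with
  | nil => simp [snakeRun]
  | cons c cs ih =>
    by_cases hc : c = ' ' ∨ c = '\n' ∨ c = '\t'
    · simp [List.foldl_cons, snakeStepA, hc, ih, snakeRun]
    · have hcs : c ≠ ' ' := by intro h; exact hc (Or.inl h)
      simp only [List.foldl_cons, snakeStepA, if_neg hc, snakeRun, ih]
      by_cases hu : PySem.Chars.isupper c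
      · by_cases hp : p = some ' ' <;> simp [hu, hp, hcs]
      · simp [hu, hcs]

-- splitOn [' '] equals snakeSp (via its fuelled go)
def snakeConsHead (pre : List Char) : List (List Char) → List (List Char)
  | [] => [pre]
  | h :: t => (pre ++ h) :: t

theorem splitOn_go_eq (l : List Char) (fuel : Nat) (cur : List Char) (acc : List (List Char))
    (hf : l.length < fuel) :
    PySem.Chars.splitOn.go [' '] fuel l cur acc
      = acc.reverse ++ snakeConsHead cur.reverse (snakeSp l) := by
  induction l generalizing fuel cur acc with
  | nil =>
    obtain ⟨f, rfl⟩ : ∃ f, fuel = f + 1 := ⟨fuel - 1, by omega⟩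
    simp [PySem.Chars.splitOn.go, snakeSp, snakeConsHead]
  | cons c rest ih =>
    obtain ⟨f, rfl⟩ : ∃ f, fuel = f + 1 := ⟨fuel - 1, by omega⟩
    by_cases hc : c = ' '
    · subst hc
      have hstep : PySem.Chars.splitOn.go [' '] (f + 1) (' ' :: rest) cur acc
          = PySem.Chars.splitOn.go [' '] f rest [] (cur.reverse :: acc) := by
        rw [PySem.Chars.splitOn.go.eq_def]
        simp [List.isPrefixOf]
      rw [hstep, ih f [] (cur.reverse :: acc) (by simp at hf; omega)]
      cases h : snakeSp rest with
      | nil => exact absurd h (snakeSp_ne_nil rest)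
      | cons a b => simp [snakeSp, h, snakeConsHead]
    · have hstep : PySem.Chars.splitOn.go [' '] (f + 1) (c :: rest) cur acc
          = PySem.Chars.splitOn.go [' '] f rest (c :: cur) acc := by
        have hcc : ¬ (' ' = c) := fun h => hc h.symm
        rw [PySem.Chars.splitOn.go.eq_def]
        simp [List.isPrefixOf, hcc]
      rw [hstep, ih f (c :: cur) acc (by simp at hf ⊢; omega)]
      cases h : snakeSp rest with
      | nil => exact absurd h (snakeSp_ne_nil rest)
      | cons a b =>
        simp [snakeSp, hc, h, snakeConsHead]

theorem splitOn_eq_snakeSp (cs : List Char) :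
    PySem.Chars.splitOn cs [' '] = snakeSp cs := by
  rw [PySem.Chars.splitOn, splitOn_go_eq cs (cs.length + 1) [] [] (by omega)]
  cases h : snakeSp cs with
  | nil => exact absurd h (snakeSp_ne_nil cs)
  | cons a b => simp [snakeConsHead]

theorem snakeJoin_nil (ps : List (List Char)) : PySem.Chars.join [] ps = ps.flatten := by
  simp only [PySem.Chars.join, List.intercalate]
  induction ps with
  | nil => simp
  | cons a t ih => cases t <;> simp_all [List.intersperse]

-- B-side word processing, flattened
def snakeProcR (w : List Char) : List Char :=
  (if snakeCondB w then ['_'] else []) ++ PySem.Chars.lower w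

theorem foldl_snakeStepB (ws : List (List Char)) (s : Int) (acc : List (List Char)) (hs : 1 ≤ s) :
    PySem.Chars.join [] ((PySem.List.enumerate ws s).foldl snakeStepB acc)
      = PySem.Chars.join [] acc ++ ws.flatMap snakeProcR := by
  induction ws generalizing s acc with
  | nil => simp [PySem.List.enumerate]
  | cons w ws ih =>
    rw [PySem.List.enumerate_cons, List.foldl_cons, ih (s + 1) _ (by omega)]
    have hpos : (0 : Int) < s := by omega
    by_cases hcond : snakeCondB w
    · simp [snakeStepB, hpos, hcond, snakeProcR, snakeJoin_nil]
    · simp [snakeStepB, hpos, hcond, snakeProcR, snakeJoin_nil]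

def snakeNorm (c : Char) : Char := if c = '\n' ∨ c = '\t' then ' ' else c

theorem lowerChar_of_not_upper (c : Char) (h : ¬ PySem.Chars.isupper c) :
    PySem.Chars.lowerChar c = c := by
  simp [PySem.Chars.lowerChar, h]

-- the central induction: B's split-then-map equals A's state machine, both states at once
theorem snake_main (cs : List Char) :
    (PySem.Chars.lower (snakeSp (cs.map snakeNorm)).headI
        ++ ((snakeSp (cs.map snakeNorm)).tail.flatMap snakeProcR) = snakeRun false cs)
    ∧ ((snakeSp (cs.map snakeNorm)).flatMap snakeProcR = snakeRun true cs) := by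
  induction cs with
  | nil => simp [snakeSp, snakeRun, snakeProcR, snakeCondB, PySem.Chars.lower]
  | cons c cs ih =>
    obtain ⟨ih0, ih1⟩ := ih
    by_cases hw : c = ' ' ∨ c = '\n' ∨ c = '\t'
    · have hn : snakeNorm c = ' ' := by
        rcases hw with h | h | h <;> simp [snakeNorm, h]
      constructor
      · simp [hn, snakeSp, snakeRun, hw, PySem.Chars.lower, ih1]
      · simp [hn, snakeSp, snakeRun, hw, snakeProcR, snakeCondB, PySem.Chars.lower, ih1]
    · have hcs : c ≠ ' ' := by intro h; exact hw (Or.inl h)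
      have hn : snakeNorm c = c := if_neg (fun h => hw (Or.inr h))
      have hlc : ¬ PySem.Chars.isupper c → PySem.Chars.lowerChar c = c := lowerChar_of_not_upper c
      cases hsp : snakeSp (cs.map snakeNorm) with
      | nil => exact absurd hsp (snakeSp_ne_nil _)
      | cons h t =>
        rw [hsp] at ih0 ih1
        constructor
        · simp only [List.map_cons, hn, snakeSp, if_neg hcs, hsp, List.headI_cons, List.tail_cons,
            PySem.Chars.lower, List.map_cons, snakeRun, if_neg hw]
          rw [List.cons_append]
          by_cases hu : PySem.Chars.isupper c
          · simp [hu, ← ih0, PySem.Chars.lower]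
          · simp [hu, hlc hu, ← ih0, PySem.Chars.lower]
        · simp only [List.map_cons, hn, snakeSp, if_neg hcs, hsp, snakeRun, if_neg hw,
            List.flatMap_cons, snakeProcR, snakeCondB]
          by_cases hu : PySem.Chars.isupper c
          · simp [hu, PySem.Chars.lower, ← ih0]
          · simp [hu, hlc hu, PySem.Chars.lower, ← ih0]

-- ===== VERDICT (by name: the statement is the Claim_ definition above) =====
theorem snake_caseify_spec : Claim_equal_snake_caseify := by
  intro name _ _
  unfold Spec_snake_caseify snake_caseify snake_caseify_alt
  cases hl : name.toList with
  | nil => rfl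
  | cons h t =>
    simp only []
    have hA := foldl_snakeStepA (PySem.Chars.lowerChar h :: t) [] none
    simp only [List.nil_append] at hA
    have hnorm : (PySem.Chars.lowerChar h :: t).map (fun c => if c = '\n' ∨ c = '\t' then ' ' else c)
        = (PySem.Chars.lowerChar h :: t).map snakeNorm := rfl
    rw [hA, hnorm, splitOn_eq_snakeSp]
    cases hsp : snakeSp ((PySem.Chars.lowerChar h :: t).map snakeNorm) with
    | nil => exact absurd hsp (snakeSp_ne_nil _)
    | cons w ws =>
      rw [PySem.List.enumerate_cons, List.foldl_cons]
      have hstep : snakeStepB [] ((0 : Int), w) = [PySem.Chars.lower w] := by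
        simp [snakeStepB]
      rw [hstep]
      have h01 : (0 : Int) + 1 = 1 := by norm_num
      rw [h01, foldl_snakeStepB ws 1 [PySem.Chars.lower w] (by omega)]
      have hm := (snake_main (PySem.Chars.lowerChar h :: t)).1
      rw [hsp] at hm
      simp only [List.headI_cons, List.tail_cons] at hm
      simp [hm]
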